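-- pv_equiv track=rewrite | github.com/BYJRK/LeetCode-Solutions | Problems/Breath First Search/1765. Map of Highest Peak.py | highestPeak_v3
-- ===== SOURCE A (Python) =====
-- from typing import List
-- from collections import deque
--
-- def highestPeak_v3(isWater: List[List[int]]) -> List[List[int]]:
--     h, w = len(isWater), len(isWater[0])
--     res = [[-1] * w for _ in range(h)]
--
--     countEmpty = h * w
--     coorsToCheck = deque()
--
--     for i in range(h):
--         for j in range(w):
--             if isWater[i][j] == 1:
--                 res[i][j] = 0
--                 coorsToCheck.append((i, j))
--                 countEmpty -= 1
--
--     while len(coorsToCheck) > 0: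
--         i, j = coorsToCheck.popleft()
--         level = res[i][j] + 1
--         if i > 0 and res[i - 1][j] == -1:
--             res[i - 1][j] = level
--             coorsToCheck.append((i - 1, j))
--         # west
--         if j > 0 and res[i][j - 1] == -1:
--             res[i][j - 1] = level
--             coorsToCheck.append((i, j - 1))
--         # east
--         if j < w - 1 and res[i][j + 1] == -1:
--             res[i][j + 1] = level
--             coorsToCheck.append((i, j + 1))
--         # south
--         if i < h - 1 and res[i + 1][j] == -1:
--             res[i + 1][j] = level
--             coorsToCheck.append((i + 1, j))
--
--     return res
-- ===== SOURCE B (Python) =====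
-- from typing import List
--
-- def highestPeak_v3(isWater: List[List[int]]) -> List[List[int]]:
--     # Direct Manhattan-distance transform: with no obstacles, the BFS level of a
--     # cell is exactly the minimum L1 distance to any water cell (-1 if no water).
--     h, w = len(isWater), len(isWater[0])
--     waters = [(i, j) for i in range(h) for j in range(w) if isWater[i][j] == 1]
--     return [[min((abs(i - a) + abs(j - b) for a, b in waters), default=-1)
--              for j in range(w)]
--             for i in range(h)]
-- ===== Notes on version B (the rewrite author's own statement) =====
-- stated objective: simpler
-- what changed: Replaces the mutable-grid BFS with a deque by a direct closed-form computation: collect the water cells once and build each output cell as the minimum Manhattan distance to any water cell (default -1), which is exactly the BFS level in an obstacle-free grid.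
import Mathlib
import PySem

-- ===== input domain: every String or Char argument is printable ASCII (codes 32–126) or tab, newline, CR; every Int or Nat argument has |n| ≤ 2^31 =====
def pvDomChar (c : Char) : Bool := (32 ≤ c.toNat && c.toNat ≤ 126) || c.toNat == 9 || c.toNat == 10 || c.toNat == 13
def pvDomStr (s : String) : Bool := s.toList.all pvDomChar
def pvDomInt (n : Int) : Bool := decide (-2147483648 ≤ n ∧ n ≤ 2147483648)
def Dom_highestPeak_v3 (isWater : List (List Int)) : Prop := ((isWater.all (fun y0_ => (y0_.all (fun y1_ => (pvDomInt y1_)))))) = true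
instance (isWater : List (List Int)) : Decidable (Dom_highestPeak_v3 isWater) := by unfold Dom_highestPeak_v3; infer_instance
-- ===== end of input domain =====

-- B replaces A's deque-based BFS flood fill by the closed-form Manhattan distance
-- transform (per-cell minimum L1 distance to the water cells, -1 if there is none);
-- objective: simpler (no mutable grid, no queue), not faster.

-- ===== PORT A =====
-- shared low-level grid access (Python res[i][j] read/write; all uses are in bounds)
def pvGet (g : List (List Int)) (i j : Nat) : Int := (g.getD i []).getD j (-1)
def pvSet (g : List (List Int)) (i j : Nat) (v : Int) : List (List Int) :=
  g.set i ((g.getD i []).set j v)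
-- row-major cell order, as Python's `for i in range(h): for j in range(w)`
def pvCells (h w : Nat) : List (Nat × Nat) :=
  (List.range h).flatMap (fun i => (List.range w).map (fun j => (i, j)))

-- one `if … and res[..] == -1:` block of A's while loop
def pvRelax (level : Int) (st : List (List Int) × List (Nat × Nat)) (c : Nat × Nat) :
    List (List Int) × List (Nat × Nat) :=
  if pvGet st.1 c.1 c.2 = -1 then (pvSet st.1 c.1 c.2 level, st.2 ++ [c]) else st
-- the four guarded neighbours, in A's order: north, west, east, south
def pvNbrs (h w i j : Nat) : List (Nat × Nat) :=
  (if 0 < i then [(i - 1, j)] else []) ++ (if 0 < j then [(i, j - 1)] else []) ++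
  (if j + 1 < w then [(i, j + 1)] else []) ++ (if i + 1 < h then [(i + 1, j)] else [])
-- A's `while len(coorsToCheck) > 0` loop; fuel only makes it total (2*h*w+1 always suffices:
-- at most h*w initial queue entries and at most h*w enqueues ever happen)
def pvLoop (h w : Nat) : Nat → List (List Int) → List (Nat × Nat) → List (List Int)
  | 0, res, _ => res
  | _ + 1, res, [] => res
  | fuel + 1, res, c :: q =>
    let level := pvGet res c.1 c.2 + 1
    let st := (pvNbrs h w c.1 c.2).foldl (pvRelax level) (res, q)
    pvLoop h w fuel st.1 st.2
-- A's first double loop: seed water cells with 0 and enqueue them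
-- (A's `countEmpty` is written but never read; it is omitted)
def pvInit (isWater : List (List Int)) (h w : Nat) :
    List (List Int) × List (Nat × Nat) :=
  (pvCells h w).foldl
    (fun st c => if pvGet isWater c.1 c.2 = 1 then (pvSet st.1 c.1 c.2 0, st.2 ++ [c]) else st)
    (List.replicate h (List.replicate w (-1)), [])

def highestPeak_v3 (isWater : List (List Int)) : List (List Int) :=
  let h := isWater.length
  let w := (isWater.getD 0 []).length
  let st := pvInit isWater h w
  pvLoop h w (2 * h * w + 1) st.1 st.2

-- ===== PORT B =====
-- Source B's water-cell list comprehension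
def pvWaters (isWater : List (List Int)) (h w : Nat) : List (Nat × Nat) :=
  (pvCells h w).filter (fun c => decide (pvGet isWater c.1 c.2 = 1))

def highestPeak_v3_alt (isWater : List (List Int)) : List (List Int) :=
  let h := isWater.length
  let w := (isWater.getD 0 []).length
  let ws := pvWaters isWater h w
  (List.range h).map (fun (i : Nat) => (List.range w).map (fun (j : Nat) =>
    match (ws.map (fun s => |(i : Int) - (s.1 : Int)| + |(j : Int) - (s.2 : Int)|)).min? with
    | some m => m
    | none => -1))

-- ===== PRECONDITION & SPEC =====
-- Pre_ excludes exactly the inputs on which Python A raises IndexError: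
-- the empty outer list (isWater[0]) and grids where some row is shorter than the first row.
def Pre_highestPeak_v3 (isWater : List (List Int)) : Prop :=
  isWater ≠ [] ∧ ∀ row ∈ isWater, (isWater.getD 0 []).length ≤ row.length
instance (isWater : List (List Int)) : Decidable (Pre_highestPeak_v3 isWater) := by
  unfold Pre_highestPeak_v3; infer_instance

def pvWitness_highestPeak_v3 : List (List Int) := [[1, 0, 2], [0, 0, 0]]

def Spec_highestPeak_v3 (isWater : List (List Int)) (out : List (List Int)) : Prop :=
  out = highestPeak_v3_alt isWater
instance (isWater : List (List Int)) (out : List (List Int)) :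
    Decidable (Spec_highestPeak_v3 isWater out) := by unfold Spec_highestPeak_v3; infer_instance

-- ===== CLAIM (what is proved, stated in full; the proofs are below) =====
def Claim_equal_highestPeak_v3 : Prop := ∀ (isWater : List (List Int)),
  Dom_highestPeak_v3 isWater → Pre_highestPeak_v3 isWater →
  Spec_highestPeak_v3 isWater (highestPeak_v3 isWater)

-- ===== LEMMAS AND PROOFS =====

-- L1 distance between cells, and the distance transform the two programs compute
def natL1 (c s : Nat × Nat) : Nat :=
  ((c.1 : Int) - (s.1 : Int)).natAbs + ((c.2 : Int) - (s.2 : Int)).natAbs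
def pvD (g : List (List Int)) (h w : Nat) (c : Nat × Nat) : Nat :=
  (((pvWaters g h w).map (natL1 c)).min?).getD 0
def pvDims (h w : Nat) (res : List (List Int)) : Prop :=
  res.length = h ∧ ∀ i, i < h → (res.getD i []).length = w
def pvMultiSet (res : List (List Int)) (cs : List (Nat × Nat)) (v : Int) : List (List Int) :=
  cs.foldl (fun r c => pvSet r c.1 c.2 v) res
def pvUn (h w : Nat) (res : List (List Int)) : Nat :=
  (((Finset.range h) ×ˢ (Finset.range w)).filter (fun c => pvGet res c.1 c.2 = -1)).card

theorem pvDims_pvSet {h w : Nat} {res : List (List Int)} (hd : pvDims h w res)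
    (i j : Nat) (v : Int) : pvDims h w (pvSet res i j v) := by
  obtain ⟨hl, hr⟩ := hd
  constructor
  · simpa [pvSet] using hl
  · intro i' hi'
    have h1 := hr i' hi'
    simp only [List.getD_eq_getElem?_getD] at h1 ⊢
    simp only [pvSet]
    rw [List.getElem?_set]
    split
    · next heq =>
      subst heq
      split
      · simpa using h1
      · next hlt => exact (hlt (by omega)).elim
    · exact h1

theorem pvGet_pvSet_self {h w : Nat} {res : List (List Int)} (hd : pvDims h w res)
    {i j : Nat} (hi : i < h) (hj : j < w) (v : Int) :
    pvGet (pvSet res i j v) i j = v := by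
  obtain ⟨hl, hr⟩ := hd
  have hi' : i < res.length := by omega
  have hj' : j < (res.getD i []).length := by rw [hr i hi]; exact hj
  rw [List.getD_eq_getElem?_getD, List.getElem?_eq_getElem hi'] at hj'
  simp only [Option.getD_some] at hj'
  simp [pvGet, pvSet, List.getD_eq_getElem?_getD, List.getElem?_set, hi', hj']

theorem pvGet_pvSet_ne {res : List (List Int)} {i j i' j' : Nat}
    (hne : ¬(i = i' ∧ j = j')) (v : Int) :
    pvGet (pvSet res i j v) i' j' = pvGet res i' j' := by
  by_cases hii : i = i'
  · subst hii
    have hjj : j ≠ j' := fun hh => hne ⟨rfl, hh⟩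
    simp only [pvGet, pvSet, List.getD_eq_getElem?_getD]
    rw [List.getElem?_set]
    split
    · split
      · next hlt =>
        simp only [Option.getD_some]
        rw [List.getElem?_set, if_neg hjj]
      · next hlt => rw [List.getElem?_eq_none (show res.length ≤ i by omega)]
    · rfl
  · simp only [pvGet, pvSet, List.getD_eq_getElem?_getD]
    rw [List.getElem?_set, if_neg hii]

theorem mem_pvCells {h w : Nat} {c : Nat × Nat} :
    c ∈ pvCells h w ↔ c.1 < h ∧ c.2 < w := by
  obtain ⟨a, b⟩ := c
  simp only [pvCells, List.mem_flatMap, List.mem_map, List.mem_range, Prod.mk.injEq]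
  constructor
  · rintro ⟨i, hi, j, hj, rfl, rfl⟩; exact ⟨hi, hj⟩
  · rintro ⟨h1, h2⟩; exact ⟨a, h1, b, h2, rfl, rfl⟩

theorem nodup_pvCells {h w : Nat} : (pvCells h w).Nodup := by
  have : pvCells h w = (List.range h) ×ˢ (List.range w) := rfl
  rw [this]
  exact (List.nodup_range).product (List.nodup_range)

theorem mem_pvWaters {g : List (List Int)} {h w : Nat} {c : Nat × Nat} :
    c ∈ pvWaters g h w ↔ (c.1 < h ∧ c.2 < w) ∧ pvGet g c.1 c.2 = 1 := by
  simp [pvWaters, List.mem_filter, mem_pvCells]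

theorem nodup_pvWaters {g : List (List Int)} {h w : Nat} : (pvWaters g h w).Nodup :=
  nodup_pvCells.filter _

theorem pvDims_pvMultiSet {h w : Nat} {res : List (List Int)} (hd : pvDims h w res)
    (cs : List (Nat × Nat)) (v : Int) : pvDims h w (pvMultiSet res cs v) := by
  induction cs generalizing res with
  | nil => exact hd
  | cons c t ih =>
    simp only [pvMultiSet, List.foldl_cons]
    exact ih (pvDims_pvSet hd c.1 c.2 v)

theorem pvGet_pvMultiSet {h w : Nat} {res : List (List Int)} (hd : pvDims h w res)
    {cs : List (Nat × Nat)} (hinb : ∀ c ∈ cs, c.1 < h ∧ c.2 < w) (hnd : cs.Nodup)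
    (v : Int) (c : Nat × Nat) :
    pvGet (pvMultiSet res cs v) c.1 c.2 = if c ∈ cs then v else pvGet res c.1 c.2 := by
  induction cs generalizing res with
  | nil => simp [pvMultiSet]
  | cons c' t ih =>
    simp only [pvMultiSet, List.foldl_cons] at *
    have hinb' : ∀ x ∈ t, x.1 < h ∧ x.2 < w := fun x hx => hinb x (List.mem_cons_of_mem _ hx)
    have hd' := pvDims_pvSet hd c'.1 c'.2 v
    rw [ih hd' hinb' hnd.of_cons]
    by_cases hct : c ∈ t
    · simp [hct, List.mem_cons]
    · by_cases hcc : c = c'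
      · subst hcc
        obtain ⟨h1, h2⟩ := hinb c (List.mem_cons_self ..)
        simp [hct, pvGet_pvSet_self hd h1 h2 v]
      · have hne : ¬(c'.1 = c.1 ∧ c'.2 = c.2) := by
          rintro ⟨ha, hb⟩
          apply hcc
          obtain ⟨a, b⟩ := c; obtain ⟨a', b'⟩ := c'
          simp_all
        simp [hct, hcc, pvGet_pvSet_ne hne v]

-- characterization of the fold of pvRelax over a nodup list of cells
theorem foldl_pvRelax_char {h w : Nat} {res : List (List Int)} (hd : pvDims h w res)
    {ns : List (Nat × Nat)} (hinb : ∀ c ∈ ns, c.1 < h ∧ c.2 < w) (hnd : ns.Nodup)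
    (level : Int) (q : List (Nat × Nat)) :
    ns.foldl (pvRelax level) (res, q) =
      (pvMultiSet res (ns.filter (fun n => decide (pvGet res n.1 n.2 = -1))) level,
       q ++ ns.filter (fun n => decide (pvGet res n.1 n.2 = -1))) := by
  induction ns generalizing res q with
  | nil => simp [pvMultiSet]
  | cons n t ih =>
    have hinb' : ∀ x ∈ t, x.1 < h ∧ x.2 < w := fun x hx => hinb x (List.mem_cons_of_mem _ hx)
    have hnmem : n ∉ t := (List.nodup_cons.mp hnd).1
    by_cases hn : pvGet res n.1 n.2 = -1
    · simp only [List.foldl_cons, pvRelax, if_pos hn]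
      rw [ih (pvDims_pvSet hd n.1 n.2 level) hinb' hnd.of_cons]
      have hfil : t.filter (fun m => decide (pvGet (pvSet res n.1 n.2 level) m.1 m.2 = -1))
          = t.filter (fun m => decide (pvGet res m.1 m.2 = -1)) := by
        apply List.filter_congr
        intro m hm
        have hmn : ¬(n.1 = m.1 ∧ n.2 = m.2) := by
          rintro ⟨h1, h2⟩
          exact hnmem ((Prod.ext h1 h2) ▸ hm)
        rw [pvGet_pvSet_ne hmn]
      rw [hfil]
      have hfc : (n :: t).filter (fun m => decide (pvGet res m.1 m.2 = -1))
          = n :: t.filter (fun m => decide (pvGet res m.1 m.2 = -1)) := by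
        simp [List.filter_cons, hn]
      rw [hfc]
      simp only [pvMultiSet, List.foldl_cons, List.append_assoc, List.singleton_append]
    · simp only [List.foldl_cons, pvRelax, if_neg hn]
      rw [ih hd hinb' hnd.of_cons]
      have hfc : (n :: t).filter (fun m => decide (pvGet res m.1 m.2 = -1))
          = t.filter (fun m => decide (pvGet res m.1 m.2 = -1)) := by
        simp [List.filter_cons, hn]
      rw [hfc]

-- characterization of A's init fold
theorem pvInit_char (g : List (List Int)) (h w : Nat) :
    pvInit g h w =
      (pvMultiSet (List.replicate h (List.replicate w (-1))) (pvWaters g h w) 0,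
       pvWaters g h w) := by
  have aux : ∀ (cs : List (Nat × Nat)) (res : List (List Int)) (q : List (Nat × Nat)),
      cs.foldl (fun st c => if pvGet g c.1 c.2 = 1 then (pvSet st.1 c.1 c.2 0, st.2 ++ [c]) else st) (res, q)
      = (pvMultiSet res (cs.filter (fun c => decide (pvGet g c.1 c.2 = 1))) 0,
         q ++ cs.filter (fun c => decide (pvGet g c.1 c.2 = 1))) := by
    intro cs
    induction cs with
    | nil => intro res q; simp [pvMultiSet]
    | cons c t ih =>
      intro res q
      by_cases hc : pvGet g c.1 c.2 = 1
      · simp only [List.foldl_cons, if_pos hc]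
        rw [ih]
        simp [List.filter_cons, hc, pvMultiSet]
      · simp only [List.foldl_cons, if_neg hc]
        rw [ih]
        simp [List.filter_cons, hc]
  unfold pvInit pvWaters
  rw [aux]
  simp

theorem pvGet_blank (h w i j : Nat) :
    pvGet (List.replicate h (List.replicate w (-1))) i j = -1 := by
  simp only [pvGet, List.getD_eq_getElem?_getD, List.getElem?_replicate]
  split
  · simp only [Option.getD_some, List.getElem?_replicate]
    split <;> rfl
  · rfl

theorem pvDims_blank (h w : Nat) :
    pvDims h w (List.replicate h (List.replicate w (-1))) := by
  constructor
  · simp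
  · intro i hi
    simp [List.getD_eq_getElem?_getD, List.getElem?_replicate, hi]

-- lemmas about pvD
theorem pvD_le {g : List (List Int)} {h w : Nat} {s : Nat × Nat}
    (hs : s ∈ pvWaters g h w) (c : Nat × Nat) : pvD g h w c ≤ natL1 c s := by
  have hne : (pvWaters g h w).map (natL1 c) ≠ [] := by
    simp only [ne_eq, List.map_eq_nil_iff]
    intro hh
    rw [hh] at hs
    exact List.not_mem_nil hs
  obtain ⟨m, hm⟩ := Option.isSome_iff_exists.mp (List.isSome_min?_of_ne_nil hne)
  have hmem : natL1 c s ∈ (pvWaters g h w).map (natL1 c) := List.mem_map_of_mem hs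
  have := (List.le_min?_iff hm).mp le_rfl _ hmem
  simpa [pvD, hm] using this

theorem pvD_spec {g : List (List Int)} {h w : Nat} (hW : pvWaters g h w ≠ [])
    (c : Nat × Nat) : ∃ s ∈ pvWaters g h w, pvD g h w c = natL1 c s := by
  obtain ⟨m, hm⟩ := Option.isSome_iff_exists.mp (List.isSome_min?_of_ne_nil
    (by simpa only [ne_eq, List.map_eq_nil_iff] using hW)
    : (((pvWaters g h w).map (natL1 c)).min?).isSome)
  have hmem := List.min?_mem hm
  obtain ⟨s, hs, hval⟩ := List.mem_map.mp hmem
  exact ⟨s, hs, by simp [pvD, hm, hval.symm]⟩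

theorem natL1_comm (c s : Nat × Nat) : natL1 c s = natL1 s c := by
  simp only [natL1]; omega

theorem pvD_water {g : List (List Int)} {h w : Nat} {c : Nat × Nat}
    (hc : c ∈ pvWaters g h w) : pvD g h w c = 0 := by
  have h1 := pvD_le hc c
  have h2 : natL1 c c = 0 := by simp [natL1]
  omega

theorem pvD_zero {g : List (List Int)} {h w : Nat} (hW : pvWaters g h w ≠ [])
    {c : Nat × Nat} (h0 : pvD g h w c = 0) : c ∈ pvWaters g h w := by
  obtain ⟨s, hs, hval⟩ := pvD_spec hW c
  have : natL1 c s = 0 := by omega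
  have hc : c = s := by
    obtain ⟨c1, c2⟩ := c; obtain ⟨s1, s2⟩ := s
    simp only [natL1] at this
    have : c1 = s1 ∧ c2 = s2 := by omega
    simp [this.1, this.2]
  exact hc ▸ hs

theorem pvD_nbr_le {g : List (List Int)} {h w : Nat} (hW : pvWaters g h w ≠ [])
    {c n : Nat × Nat} (hadj : natL1 c n = 1) : pvD g h w n ≤ pvD g h w c + 1 := by
  obtain ⟨s, hs, hval⟩ := pvD_spec hW c
  have h1 := pvD_le hs n
  have htri : natL1 n s ≤ natL1 c s + natL1 c n := by
    simp only [natL1]; omega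
  omega

theorem pvD_succ_nbr {g : List (List Int)} {h w : Nat} (hW : pvWaters g h w ≠ [])
    {c : Nat × Nat} (hc1 : c.1 < h) (hc2 : c.2 < w) {k : Nat}
    (hk : pvD g h w c = k + 1) :
    ∃ n : Nat × Nat, (n.1 < h ∧ n.2 < w) ∧ natL1 c n = 1 ∧ pvD g h w n = k := by
  obtain ⟨s, hsW, hs⟩ := pvD_spec hW c
  obtain ⟨⟨hs1, hs2⟩, _⟩ := mem_pvWaters.mp hsW
  obtain ⟨c1, c2⟩ := c
  obtain ⟨s1, s2⟩ := s
  by_cases h1 : c1 = s1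
  · -- move along the column towards s2
    refine ⟨(c1, if s2 < c2 then c2 - 1 else c2 + 1), ⟨hc1, ?_⟩, ?_, ?_⟩
    · subst h1
      simp only [natL1] at hs
      split <;> omega
    · subst h1
      simp only [natL1] at hs ⊢
      split <;> omega
    · subst h1
      have hle : pvD g h w (c1, if s2 < c2 then c2 - 1 else c2 + 1) ≤ k := by
        have := pvD_le hsW (c1, if s2 < c2 then c2 - 1 else c2 + 1)
        simp only [natL1] at hs this ⊢
        split at this <;> split <;> omega
      have hadj : natL1 (c1, c2) (c1, if s2 < c2 then c2 - 1 else c2 + 1) = 1 := by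
        simp only [natL1] at hs ⊢
        split <;> omega
      have hge := pvD_nbr_le hW (natL1_comm _ _ ▸ hadj :
        natL1 (c1, if s2 < c2 then c2 - 1 else c2 + 1) (c1, c2) = 1)
      omega
  · -- move along the row towards s1
    refine ⟨(if s1 < c1 then c1 - 1 else c1 + 1, c2), ⟨?_, hc2⟩, ?_, ?_⟩
    · simp only [natL1] at hs
      split <;> omega
    · simp only [natL1] at hs ⊢
      split <;> omega
    · have hle : pvD g h w (if s1 < c1 then c1 - 1 else c1 + 1, c2) ≤ k := by
        have := pvD_le hsW (if s1 < c1 then c1 - 1 else c1 + 1, c2)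
        simp only [natL1] at hs this ⊢
        split at this <;> split <;> omega
      have hadj : natL1 (c1, c2) (if s1 < c1 then c1 - 1 else c1 + 1, c2) = 1 := by
        simp only [natL1] at hs ⊢
        split <;> omega
      have hge := pvD_nbr_le hW (natL1_comm _ _ ▸ hadj :
        natL1 (if s1 < c1 then c1 - 1 else c1 + 1, c2) (c1, c2) = 1)
      omega

theorem mem_pvNbrs {h w i j : Nat} (hi : i < h) (hj : j < w) {n : Nat × Nat} :
    n ∈ pvNbrs h w i j ↔ (n.1 < h ∧ n.2 < w) ∧ natL1 (i, j) n = 1 := by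
  obtain ⟨n1, n2⟩ := n
  simp only [pvNbrs]
  split_ifs <;> simp [natL1, Prod.ext_iff] <;> omega

theorem nodup_pvNbrs {h w i j : Nat} : (pvNbrs h w i j).Nodup := by
  simp only [pvNbrs]
  split_ifs
  all_goals simp [List.Nodup, Prod.ext_iff]
  all_goals try omega
  all_goals exact ⟨fun a b h1 h2 => by omega, fun a b h1 h2 => by omega⟩

-- the BFS loop invariant
structure BfsInv (g : List (List Int)) (h w : Nat)
    (res : List (List Int)) (q : List (Nat × Nat)) : Prop where
  dims : pvDims h w res
  assigned : ∀ c : Nat × Nat, c.1 < h → c.2 < w → pvGet res c.1 c.2 ≠ -1 →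
    pvGet res c.1 c.2 = (pvD g h w c : Int)
  water_assigned : ∀ c ∈ pvWaters g h w, pvGet res c.1 c.2 ≠ -1
  q_inb : ∀ c ∈ q, c.1 < h ∧ c.2 < w
  q_assigned : ∀ c ∈ q, pvGet res c.1 c.2 ≠ -1
  q_sorted : q.Pairwise (fun a b => pvD g h w a ≤ pvD g h w b)
  q_tight : ∀ p, q.head? = some p → ∀ b ∈ q, pvD g h w b ≤ pvD g h w p + 1
  frontier : ∀ c : Nat × Nat, c.1 < h → c.2 < w → pvGet res c.1 c.2 = -1 →
    ∀ n : Nat × Nat, n.1 < h → n.2 < w → natL1 c n = 1 → pvGet res n.1 n.2 ≠ -1 → n ∈ q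
  far : ∀ p, q.head? = some p → ∀ c : Nat × Nat, c.1 < h → c.2 < w →
    pvGet res c.1 c.2 = -1 → pvD g h w p < pvD g h w c

theorem bfs_init_inv (g : List (List Int)) (h w : Nat) :
    BfsInv g h w (pvMultiSet (List.replicate h (List.replicate w (-1))) (pvWaters g h w) 0)
      (pvWaters g h w) := by
  have hdB := pvDims_blank h w
  have hWinb : ∀ c ∈ pvWaters g h w, c.1 < h ∧ c.2 < w := fun c hc => (mem_pvWaters.mp hc).1
  have hG : ∀ c : Nat × Nat,
      pvGet (pvMultiSet (List.replicate h (List.replicate w (-1))) (pvWaters g h w) 0) c.1 c.2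
      = if c ∈ pvWaters g h w then 0 else -1 := by
    intro c
    rw [pvGet_pvMultiSet hdB hWinb nodup_pvWaters 0 c, pvGet_blank]
  constructor
  · exact pvDims_pvMultiSet hdB _ 0
  · intro c hc1 hc2 hne
    rw [hG] at hne ⊢
    split at hne
    · next hc => simp [hc, pvD_water hc]
    · simp at hne
  · intro c hc
    rw [hG, if_pos hc]
    omega
  · exact hWinb
  · intro c hc
    rw [hG, if_pos hc]
    omega
  · exact List.pairwise_of_forall_mem_list
      (fun a ha b hb => by rw [pvD_water ha, pvD_water hb])
  · intro p hp b hb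
    rw [pvD_water hb]
    omega
  · intro c _ _ hcun n _ _ _ hnas
    rw [hG] at hcun hnas
    by_cases hn : n ∈ pvWaters g h w
    · exact hn
    · rw [if_neg hn] at hnas
      simp at hnas
  · intro p hp c hc1 hc2 hcun
    have hpW : p ∈ pvWaters g h w := List.mem_of_mem_head? hp
    have hW : pvWaters g h w ≠ [] := by
      intro hh
      rw [hh] at hpW
      exact List.not_mem_nil hpW
    rw [hG] at hcun
    have hcW : c ∉ pvWaters g h w := by
      intro hc
      rw [if_pos hc] at hcun
      simp at hcun
    rw [pvD_water hpW]
    rcases Nat.eq_zero_or_pos (pvD g h w c) with h0 | h0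
    · exact absurd (pvD_zero hW h0) hcW
    · exact h0

-- one unfolding of the loop (the lets in pvLoop are definitional)
theorem pvLoop_cons (h w fuel : Nat) (res : List (List Int)) (p : Nat × Nat)
    (q : List (Nat × Nat)) :
    pvLoop h w (fuel + 1) res (p :: q) =
      pvLoop h w fuel
        ((pvNbrs h w p.1 p.2).foldl (pvRelax (pvGet res p.1 p.2 + 1)) (res, q)).1
        ((pvNbrs h w p.1 p.2).foldl (pvRelax (pvGet res p.1 p.2 + 1)) (res, q)).2 := rfl

theorem pvRow_len {h w : Nat} {r : List (List Int)} (hd : pvDims h w r) {i : Nat}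
    (hi : i < h) (h1 : i < r.length) : r[i].length = w := by
  have := hd.2 i hi
  rwa [List.getD_eq_getElem?_getD, List.getElem?_eq_getElem h1, Option.getD_some] at this

theorem pvGet_eq_getElem {h w : Nat} {r : List (List Int)} (hd : pvDims h w r) {i j : Nat}
    (h1 : i < r.length) (h2 : j < r[i].length) : r[i][j] = pvGet r i j := by
  simp [pvGet, List.getD_eq_getElem?_getD, List.getElem?_eq_getElem, h1, h2]

theorem min?_map_natCast (l : List Nat) :
    (l.map (Nat.cast : Nat → Int)).min? = l.min?.map (Nat.cast : Nat → Int) := by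
  cases l with
  | nil => rfl
  | cons a t =>
    rw [List.map_cons, List.min?_cons', List.min?_cons', Option.map_some]
    congr 1
    induction t generalizing a with
    | nil => rfl
    | cons b t ih =>
      rw [List.map_cons, List.foldl_cons, List.foldl_cons, ← Nat.cast_min]
      exact ih (min a b)

theorem bfs_step {g : List (List Int)} {h w : Nat} {res : List (List Int)}
    {p : Nat × Nat} {q : List (Nat × Nat)} (hW : pvWaters g h w ≠ [])
    (inv : BfsInv g h w res (p :: q)) :
    BfsInv g h w
      (pvMultiSet res ((pvNbrs h w p.1 p.2).filter (fun n => decide (pvGet res n.1 n.2 = -1)))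
        (pvGet res p.1 p.2 + 1))
      (q ++ (pvNbrs h w p.1 p.2).filter (fun n => decide (pvGet res n.1 n.2 = -1))) := by
  obtain ⟨dims, assigned, water_assigned, q_inb, q_assigned, q_sorted, q_tight, frontier, far⟩ := inv
  have hpmem : p ∈ p :: q := List.mem_cons_self ..
  obtain ⟨hp1, hp2⟩ := q_inb p hpmem
  have hres_p : pvGet res p.1 p.2 = (pvD g h w p : Int) :=
    assigned p hp1 hp2 (q_assigned p hpmem)
  set k := pvD g h w p with hkdef
  set keep := (pvNbrs h w p.1 p.2).filter (fun n => decide (pvGet res n.1 n.2 = -1)) with hkeepdef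
  have hkeep_mem : ∀ n, n ∈ keep ↔ (n ∈ pvNbrs h w p.1 p.2 ∧ pvGet res n.1 n.2 = -1) := by
    intro n
    rw [hkeepdef, List.mem_filter]
    simp
  have hkeep_inb : ∀ n ∈ keep, n.1 < h ∧ n.2 < w := fun n hn =>
    ((mem_pvNbrs hp1 hp2).mp ((hkeep_mem n).mp hn).1).1
  have hkeep_adj : ∀ n ∈ keep, natL1 p n = 1 := fun n hn =>
    ((mem_pvNbrs hp1 hp2).mp ((hkeep_mem n).mp hn).1).2
  have hkeep_un : ∀ n ∈ keep, pvGet res n.1 n.2 = -1 := fun n hn => ((hkeep_mem n).mp hn).2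
  have hkeep_nd : keep.Nodup := nodup_pvNbrs.filter _
  have hG : ∀ c : Nat × Nat, pvGet (pvMultiSet res keep (pvGet res p.1 p.2 + 1)) c.1 c.2
      = if c ∈ keep then (k : Int) + 1 else pvGet res c.1 c.2 := by
    intro c
    rw [pvGet_pvMultiSet dims hkeep_inb hkeep_nd _ c, hres_p]
  have hval_ne : ((k : Int) + 1) ≠ -1 := by omega
  have hd_keep : ∀ n ∈ keep, pvD g h w n = k + 1 := by
    intro n hn
    obtain ⟨hn1, hn2⟩ := hkeep_inb n hn
    have h1 : pvD g h w n ≤ k + 1 := pvD_nbr_le hW (hkeep_adj n hn)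
    have h2 : k < pvD g h w n := far p rfl n hn1 hn2 (hkeep_un n hn)
    omega
  -- if some cell c is still unassigned afterwards but has distance exactly k + 1,
  -- then one of its neighbours n ∈ q has distance k
  have hsub : ∀ c : Nat × Nat, c.1 < h → c.2 < w → pvGet res c.1 c.2 = -1 → c ∉ keep →
      pvD g h w c = k + 1 → ∃ n ∈ q, pvD g h w n = k := by
    intro c hc1 hc2 hcun hck hdc
    obtain ⟨n, ⟨hn1, hn2⟩, hadj, hdn⟩ := pvD_succ_nbr hW hc1 hc2 hdc
    have hnas : pvGet res n.1 n.2 ≠ -1 := by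
      intro hun'
      have := far p rfl n hn1 hn2 hun'
      omega
    have hmem := frontier c hc1 hc2 hcun n hn1 hn2 hadj hnas
    rcases List.mem_cons.mp hmem with rfl | hmem
    · exfalso
      apply hck
      refine (hkeep_mem c).mpr ⟨(mem_pvNbrs hp1 hp2).mpr ⟨⟨hc1, hc2⟩, ?_⟩, hcun⟩
      simp only [natL1] at hadj ⊢
      omega
    · exact ⟨n, hmem, hdn⟩
  refine ⟨pvDims_pvMultiSet dims _ _, ?_, ?_, ?_, ?_, ?_, ?_, ?_, ?_⟩
  · -- assigned
    intro c hc1 hc2 hne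
    rw [hG] at hne ⊢
    by_cases hc : c ∈ keep
    · rw [if_pos hc]
      rw [hd_keep c hc]
      push_cast
      ring
    · rw [if_neg hc] at hne ⊢
      exact assigned c hc1 hc2 hne
  · -- water_assigned
    intro c hc
    rw [hG]
    by_cases hck : c ∈ keep
    · rw [if_pos hck]; exact hval_ne
    · rw [if_neg hck]; exact water_assigned c hc
  · -- q_inb
    intro c hc
    rcases List.mem_append.mp hc with hc | hc
    · exact q_inb c (List.mem_cons_of_mem _ hc)
    · exact hkeep_inb c hc
  · -- q_assigned
    intro c hc
    rw [hG]
    rcases List.mem_append.mp hc with hc | hc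
    · have hcn : c ∉ keep := fun hck =>
        (q_assigned c (List.mem_cons_of_mem _ hc)) (hkeep_un c hck)
      rw [if_neg hcn]
      exact q_assigned c (List.mem_cons_of_mem _ hc)
    · rw [if_pos hc]; exact hval_ne
  · -- q_sorted
    rw [List.pairwise_append]
    refine ⟨(List.pairwise_cons.mp q_sorted).2, ?_, ?_⟩
    · exact List.pairwise_of_forall_mem_list
        (fun a ha b hb => by rw [hd_keep a ha, hd_keep b hb])
    · intro a ha b hb
      have h1 : pvD g h w a ≤ k + 1 := q_tight p rfl a (List.mem_cons_of_mem _ ha)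
      rw [hd_keep b hb]
      exact h1
  · -- q_tight
    intro hd' hhd b hb
    cases q with
    | nil =>
      simp only [List.nil_append] at hhd hb
      have hhd' : hd' ∈ keep := List.mem_of_mem_head? hhd
      rw [hd_keep hd' hhd', hd_keep b hb]
      omega
    | cons p' q'' =>
      have hhd' : p' = hd' := by simpa using hhd
      subst hhd'
      have hp'k : k ≤ pvD g h w p' := (List.pairwise_cons.mp q_sorted).1 p' (List.mem_cons_self ..)
      rcases List.mem_append.mp hb with hb | hb
      · have := q_tight p rfl b (List.mem_cons_of_mem _ hb)
        omega
      · rw [hd_keep b hb]; omega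
  · -- frontier
    intro c hc1 hc2 hcun n hn1 hn2 hadj hnas
    rw [hG] at hcun hnas
    have hck : c ∉ keep := by
      intro hck
      rw [if_pos hck] at hcun
      exact hval_ne hcun
    rw [if_neg hck] at hcun
    by_cases hnk : n ∈ keep
    · exact List.mem_append.mpr (Or.inr hnk)
    · rw [if_neg hnk] at hnas
      have hmem := frontier c hc1 hc2 hcun n hn1 hn2 hadj hnas
      rcases List.mem_cons.mp hmem with rfl | hmem
      · exfalso
        apply hck
        refine (hkeep_mem c).mpr ⟨(mem_pvNbrs hp1 hp2).mpr ⟨⟨hc1, hc2⟩, ?_⟩, hcun⟩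
        simp only [natL1] at hadj ⊢
        omega
      · exact List.mem_append.mpr (Or.inl hmem)
  · -- far
    intro hd' hhd c hc1 hc2 hcun
    rw [hG] at hcun
    have hck : c ∉ keep := by
      intro hck
      rw [if_pos hck] at hcun
      exact hval_ne hcun
    rw [if_neg hck] at hcun
    have hfar : k < pvD g h w c := far p rfl c hc1 hc2 hcun
    cases q with
    | nil =>
      have hhd' : hd' ∈ keep := List.mem_of_mem_head? (by simpa using hhd)
      rw [hd_keep hd' hhd']
      rcases Nat.lt_or_ge (k + 1) (pvD g h w c) with hlt | hge
      · exact hlt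
      · exfalso
        obtain ⟨n, hn, hdn⟩ := hsub c hc1 hc2 hcun hck (by omega)
        exact List.not_mem_nil hn
    | cons p' q'' =>
      have hhd' : p' = hd' := by simpa using hhd
      subst hhd'
      have hp'k : k ≤ pvD g h w p' := (List.pairwise_cons.mp q_sorted).1 p' (List.mem_cons_self ..)
      by_cases hp'v : pvD g h w p' = k + 1
      · rcases Nat.lt_or_ge (k + 1) (pvD g h w c) with hlt | hge
        · omega
        · exfalso
          obtain ⟨n, hn, hdn⟩ := hsub c hc1 hc2 hcun hck (by omega)
          have hsorted' := (List.pairwise_cons.mp q_sorted).2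
          have hp'n : pvD g h w p' ≤ pvD g h w n := by
            rcases List.mem_cons.mp hn with rfl | hn'
            · exact le_rfl
            · exact (List.pairwise_cons.mp hsorted').1 n hn'
          omega
      · have := q_tight p rfl p' (List.mem_cons_of_mem _ (List.mem_cons_self ..))
        omega

theorem pvUn_pvMultiSet {h w : Nat} {res : List (List Int)} (hd : pvDims h w res)
    {cs : List (Nat × Nat)} (hinb : ∀ c ∈ cs, c.1 < h ∧ c.2 < w) (hnd : cs.Nodup)
    (hun : ∀ c ∈ cs, pvGet res c.1 c.2 = -1) {v : Int} (hv : v ≠ -1) :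
    pvUn h w (pvMultiSet res cs v) + cs.length = pvUn h w res := by
  have hG := pvGet_pvMultiSet hd hinb hnd v
  have hsub : cs.toFinset ⊆
      ((Finset.range h ×ˢ Finset.range w).filter (fun c => pvGet res c.1 c.2 = -1)) := by
    intro c hc
    rw [List.mem_toFinset] at hc
    simp only [Finset.mem_filter, Finset.mem_product, Finset.mem_range]
    exact ⟨⟨(hinb c hc).1, (hinb c hc).2⟩, hun c hc⟩
  have hset : ((Finset.range h ×ˢ Finset.range w).filter
        (fun c => pvGet (pvMultiSet res cs v) c.1 c.2 = -1))
      = ((Finset.range h ×ˢ Finset.range w).filter (fun c => pvGet res c.1 c.2 = -1))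
        \ cs.toFinset := by
    ext c
    simp only [Finset.mem_filter, Finset.mem_sdiff, List.mem_toFinset, hG c,
      Finset.mem_product, Finset.mem_range]
    by_cases hc : c ∈ cs <;> simp [hc, hv] <;> tauto
  unfold pvUn
  rw [hset, Finset.card_sdiff, Finset.inter_eq_left.mpr hsub, List.toFinset_card_of_nodup hnd]
  have := Finset.card_le_card hsub
  rw [List.toFinset_card_of_nodup hnd] at this
  omega

theorem bfs_complete {g : List (List Int)} {h w : Nat} {res : List (List Int)}
    (hW : pvWaters g h w ≠ []) (inv : BfsInv g h w res []) :
    ∀ c : Nat × Nat, c.1 < h → c.2 < w → pvGet res c.1 c.2 ≠ -1 := by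
  have main : ∀ m : Nat, ∀ c : Nat × Nat, c.1 < h → c.2 < w → pvD g h w c = m →
      pvGet res c.1 c.2 ≠ -1 := by
    intro m
    induction m using Nat.strong_induction_on with
    | _ m ih =>
      intro c hc1 hc2 hdc
      cases m with
      | zero => exact inv.water_assigned c (pvD_zero hW hdc)
      | succ k =>
        intro hun
        obtain ⟨n, ⟨hn1, hn2⟩, hadj, hdn⟩ := pvD_succ_nbr hW hc1 hc2 hdc
        have hnas : pvGet res n.1 n.2 ≠ -1 := ih k (by omega) n hn1 hn2 hdn
        have := inv.frontier c hc1 hc2 hun n hn1 hn2 hadj hnas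
        exact List.not_mem_nil this
  exact fun c hc1 hc2 => main (pvD g h w c) c hc1 hc2 rfl

theorem pvLoop_correct {g : List (List Int)} {h w : Nat} (hW : pvWaters g h w ≠ []) :
    ∀ (fuel : Nat) (res : List (List Int)) (q : List (Nat × Nat)),
      BfsInv g h w res q → q.length + 2 * pvUn h w res ≤ fuel →
      ∀ c : Nat × Nat, c.1 < h → c.2 < w →
        pvGet (pvLoop h w fuel res q) c.1 c.2 = (pvD g h w c : Int) := by
  intro fuel
  induction fuel with
  | zero =>
    intro res q inv hfuel c hc1 hc2
    have hq : q = [] := by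
      cases q with
      | nil => rfl
      | cons a b => simp at hfuel
    subst hq
    have hca := bfs_complete hW inv c hc1 hc2
    simpa [pvLoop] using inv.assigned c hc1 hc2 hca
  | succ fuel ih =>
    intro res q inv hfuel c hc1 hc2
    cases q with
    | nil =>
      have hca := bfs_complete hW inv c hc1 hc2
      simpa [pvLoop] using inv.assigned c hc1 hc2 hca
    | cons p q' =>
      have hpmem : p ∈ p :: q' := List.mem_cons_self ..
      obtain ⟨hp1, hp2⟩ := inv.q_inb p hpmem
      have hnbrs_inb : ∀ n ∈ pvNbrs h w p.1 p.2, n.1 < h ∧ n.2 < w := fun n hn =>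
        ((mem_pvNbrs hp1 hp2).mp hn).1
      have hchar := foldl_pvRelax_char inv.dims hnbrs_inb nodup_pvNbrs
        (pvGet res p.1 p.2 + 1) q'
      have hstep := bfs_step hW inv
      have hloop : pvLoop h w (fuel + 1) res (p :: q') =
          pvLoop h w fuel
            (pvMultiSet res
              ((pvNbrs h w p.1 p.2).filter (fun n => decide (pvGet res n.1 n.2 = -1)))
              (pvGet res p.1 p.2 + 1))
            (q' ++ (pvNbrs h w p.1 p.2).filter (fun n => decide (pvGet res n.1 n.2 = -1))) := by
        rw [pvLoop_cons, hchar]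
      rw [hloop]
      have hres_p : pvGet res p.1 p.2 = (pvD g h w p : Int) :=
        inv.assigned p hp1 hp2 (inv.q_assigned p hpmem)
      have hv : (pvGet res p.1 p.2 + 1) ≠ -1 := by
        rw [hres_p]
        omega
      have hkeep_inb : ∀ n ∈ (pvNbrs h w p.1 p.2).filter
          (fun n => decide (pvGet res n.1 n.2 = -1)), n.1 < h ∧ n.2 < w := fun n hn =>
        hnbrs_inb n (List.mem_of_mem_filter hn)
      have hkeep_un : ∀ n ∈ (pvNbrs h w p.1 p.2).filter
          (fun n => decide (pvGet res n.1 n.2 = -1)), pvGet res n.1 n.2 = -1 := by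
        intro n hn
        have := (List.mem_filter.mp hn).2
        simpa using this
      have hUn := pvUn_pvMultiSet inv.dims hkeep_inb (nodup_pvNbrs.filter _) hkeep_un hv
      apply ih _ _ hstep _ c hc1 hc2
      rw [List.length_append]
      have hflen : q'.length + 1 + 2 * pvUn h w res ≤ fuel + 1 := by simpa using hfuel
      omega

theorem pvLoop_dims {h w : Nat} :
    ∀ (fuel : Nat) (res : List (List Int)) (q : List (Nat × Nat)),
      pvDims h w res → pvDims h w (pvLoop h w fuel res q) := by
  have hrelax : ∀ (level : Int) (ns : List (Nat × Nat)) (st : List (List Int) × List (Nat × Nat)),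
      pvDims h w st.1 → pvDims h w (ns.foldl (pvRelax level) st).1 := by
    intro level ns
    induction ns with
    | nil => intro st hst; exact hst
    | cons n t ih =>
      intro st hst
      simp only [List.foldl_cons]
      apply ih
      unfold pvRelax
      split
      · exact pvDims_pvSet hst n.1 n.2 level
      · exact hst
  intro fuel
  induction fuel with
  | zero => intro res q hd; exact hd
  | succ fuel ih =>
    intro res q hd
    cases q with
    | nil => exact hd
    | cons p q' =>
      simp only [pvLoop]
      exact ih _ _ (hrelax _ _ _ hd)

-- ===== VERDICT (by name: the statement is the Claim_ definition above) =====
theorem highestPeak_v3_spec : Claim_equal_highestPeak_v3 := by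
  unfold Claim_equal_highestPeak_v3
  intro g _hdom _hpre
  unfold Spec_highestPeak_v3
  have hA : highestPeak_v3 g =
      pvLoop g.length (g.getD 0 []).length (2 * g.length * (g.getD 0 []).length + 1)
        (pvMultiSet (List.replicate g.length (List.replicate (g.getD 0 []).length (-1)))
          (pvWaters g g.length (g.getD 0 []).length) 0)
        (pvWaters g g.length (g.getD 0 []).length) := by
    simp only [highestPeak_v3, pvInit_char]
  rcases eq_or_ne (pvWaters g g.length (g.getD 0 []).length) [] with hWe | hWe
  · -- no water at all: the queue starts empty and the grid stays all -1
    have hA' : highestPeak_v3 g =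
        List.replicate g.length (List.replicate (g.getD 0 []).length (-1)) := by
      rw [hA, hWe]
      rfl
    have hB : highestPeak_v3_alt g =
        List.replicate g.length (List.replicate (g.getD 0 []).length (-1)) := by
      simp only [highestPeak_v3_alt, hWe, List.map_nil, List.min?_nil]
      simp [List.map_const', List.length_range]
    rw [hA', hB]
  · -- some water: every cell gets its L1 distance on both sides
    have hdims0 : pvDims g.length (g.getD 0 []).length
        (pvMultiSet (List.replicate g.length (List.replicate (g.getD 0 []).length (-1)))
          (pvWaters g g.length (g.getD 0 []).length) 0) :=
      pvDims_pvMultiSet (pvDims_blank _ _) _ 0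
    have hdimsA : pvDims g.length (g.getD 0 []).length (highestPeak_v3 g) := by
      rw [hA]
      exact pvLoop_dims _ _ _ hdims0
    have hWinb : ∀ c ∈ pvWaters g g.length (g.getD 0 []).length, c.1 < g.length ∧ c.2 < (g.getD 0 []).length :=
      fun c hc => (mem_pvWaters.mp hc).1
    have hUn0 := pvUn_pvMultiSet (pvDims_blank g.length (g.getD 0 []).length) hWinb
      nodup_pvWaters (fun c _ => pvGet_blank _ _ c.1 c.2)
      (show (0 : Int) ≠ -1 by omega)
    have hblank : pvUn g.length (g.getD 0 []).length
        (List.replicate g.length (List.replicate (g.getD 0 []).length (-1)))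
        = g.length * (g.getD 0 []).length := by
      unfold pvUn
      rw [Finset.filter_true_of_mem (fun c _ => pvGet_blank _ _ c.1 c.2)]
      simp
    have hent : ∀ c : Nat × Nat, c.1 < g.length → c.2 < (g.getD 0 []).length →
        pvGet (highestPeak_v3 g) c.1 c.2
          = (pvD g g.length (g.getD 0 []).length c : Int) := by
      intro c hc1 hc2
      rw [hA]
      apply pvLoop_correct hWe _ _ _ (bfs_init_inv g _ _) _ c hc1 hc2
      rw [hblank] at hUn0
      rw [Nat.mul_assoc]
      generalize hM : g.length * (g.getD 0 []).length = M at hUn0 ⊢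
      omega
    apply List.ext_getElem
    · rw [hdimsA.1]
      simp [highestPeak_v3_alt]
    · intro i h1 h2
      have hi : i < g.length := by rw [hdimsA.1] at h1; exact h1
      apply List.ext_getElem
      · rw [pvRow_len hdimsA hi h1]
        simp [highestPeak_v3_alt, List.getElem_map, List.getElem_range]
      · intro j hj1 hj2
        have hj : j < (g.getD 0 []).length := by rw [pvRow_len hdimsA hi h1] at hj1; exact hj1
        rw [pvGet_eq_getElem hdimsA h1 hj1, hent (i, j) hi hj]
        simp only [highestPeak_v3_alt, List.getElem_map, List.getElem_range]
        have hmapeq : (pvWaters g g.length (g.getD 0 []).length).map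
            (fun s => |(i : Int) - (s.1 : Int)| + |(j : Int) - (s.2 : Int)|)
            = ((pvWaters g g.length (g.getD 0 []).length).map (natL1 (i, j))).map
                (Nat.cast : Nat → Int) := by
          rw [List.map_map]
          apply List.map_congr_left
          intro t _
          simp only [Function.comp, natL1, Int.abs_eq_natAbs]
          push_cast
          ring
        rw [hmapeq, min?_map_natCast]
        obtain ⟨m, hm⟩ := Option.isSome_iff_exists.mp (List.isSome_min?_of_ne_nil
          (show ((pvWaters g g.length (g.getD 0 []).length).map (natL1 (i, j))) ≠ [] by
            simpa using hWe))
        rw [hm, Option.map_some]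
        have hDm : pvD g g.length (g.getD 0 []).length (i, j) = m := by
          unfold pvD
          rw [hm]
          rfl
        rw [hDm]
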